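-- pv_equiv track=rewrite | github.com/COS301-SE-2025/CRISP | core/patterns/observer/email_notification_observer.py | _group_notifications
-- ===== SOURCE A (Python) =====
-- from typing import Dict, Any, List, Optional
--
-- def _group_notifications(notifications: List[Dict[str, Any]]) -> Dict[str, List[Dict[str, Any]]]:
--     """
--     Group notifications by priority and type.
--
--     Args:
--         notifications: List of notifications to group
--
--     Returns:
--         Dictionary of grouped notifications
--     """
--     groups = {}
--
--     for notification in notifications:
--         priority = notification['priority']
--         template_type = notification['template_type']
--         group_key = f"{priority}_{template_type}"
--
--         if group_key not in groups:
--             groups[group_key] = []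
--
--         groups[group_key].append(notification)
--
--     return groups
-- ===== SOURCE B (Python) =====
-- from typing import Dict, Any, List
--
-- def _group_notifications(notifications: List[Dict[str, Any]]) -> Dict[str, List[Dict[str, Any]]]:
--     """Group notifications by priority and type (two-pass: distinct keys first, then one filter per key)."""
--     def key(n):
--         return f"{n['priority']}_{n['template_type']}"
--     keys = list(dict.fromkeys(key(n) for n in notifications))
--     return {k: [n for n in notifications if key(n) == k] for k in keys}
-- ===== Notes on version B (the rewrite author's own statement) =====
-- stated objective: alternative
-- what changed: B replaces A's one-pass dict accumulation with two passes: collect the distinct group keys in first-occurrence order, then build each group with one filter over the whole list.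
import Mathlib
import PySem

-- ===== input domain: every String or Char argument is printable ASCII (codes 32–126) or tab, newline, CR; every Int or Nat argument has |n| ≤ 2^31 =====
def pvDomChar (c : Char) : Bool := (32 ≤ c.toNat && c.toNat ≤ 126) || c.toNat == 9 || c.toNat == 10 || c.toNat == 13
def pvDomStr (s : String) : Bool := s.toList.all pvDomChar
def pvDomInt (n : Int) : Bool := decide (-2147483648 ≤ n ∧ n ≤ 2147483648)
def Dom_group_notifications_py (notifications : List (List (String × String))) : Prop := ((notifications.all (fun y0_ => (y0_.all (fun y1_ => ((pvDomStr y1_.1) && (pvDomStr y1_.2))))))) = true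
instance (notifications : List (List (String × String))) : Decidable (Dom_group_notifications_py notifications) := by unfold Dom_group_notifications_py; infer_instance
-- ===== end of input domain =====

-- B groups by two passes (distinct keys, then one filter per key) instead of A's
-- one-pass dict accumulation; objective: alternative (not claimed faster).

-- ===== PORT A =====
-- one-pass grouping into an insertion-ordered dict; notification['priority'] /
-- ['template_type'] would raise KeyError on a missing key — those inputs are
-- excluded by Pre_, so getD's default is never the value used.
def group_notifications_py (notifications : List (List (String × String))) : List (String × List (List (String × String))) :=
  (notifications.foldl (fun groups notification =>
      let priority := PySem.Dict.getD (PySem.Dict.mk notification) "priority" ""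
      let template_type := PySem.Dict.getD (PySem.Dict.mk notification) "template_type" ""
      let group_key := priority ++ "_" ++ template_type
      let groups := if !PySem.Dict.contains groups group_key then
          PySem.Dict.insert groups group_key ([] : List (List (String × String)))
        else groups
      PySem.Dict.modify groups group_key [] (fun l => l ++ [notification]))
    PySem.Dict.empty).items

-- ===== PORT B =====
def keyOfB (n : List (String × String)) : String :=
  PySem.Dict.getD (PySem.Dict.mk n) "priority" "" ++ "_" ++ PySem.Dict.getD (PySem.Dict.mk n) "template_type" ""

def group_notifications_py_alt (notifications : List (List (String × String))) : List (String × List (List (String × String))) :=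
  (PySem.List.dedup (notifications.map keyOfB)).map
    (fun k => (k, notifications.filter (fun n => keyOfB n == k)))

-- ===== PRECONDITION & SPEC =====
-- Pre_ excludes exactly the inputs where A raises KeyError: a notification
-- missing the 'priority' or 'template_type' key.
def Pre_group_notifications_py (notifications : List (List (String × String))) : Prop :=
  ∀ n ∈ notifications,
    n.any (fun p => p.1 == "priority") = true ∧ n.any (fun p => p.1 == "template_type") = true
instance (notifications : List (List (String × String))) : Decidable (Pre_group_notifications_py notifications) := by unfold Pre_group_notifications_py; infer_instance

def pvWitness_group_notifications_py : (List (List (String × String))) :=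
  [[("priority", "high"), ("template_type", "alert")], [("priority", "low"), ("template_type", "alert")]]

def Spec_group_notifications_py (notifications : List (List (String × String))) (out : List (String × List (List (String × String)))) : Prop := out = group_notifications_py_alt notifications
instance (notifications : List (List (String × String))) (out : List (String × List (List (String × String)))) : Decidable (Spec_group_notifications_py notifications out) := by unfold Spec_group_notifications_py; infer_instance

-- ===== CLAIM (what is proved, stated in full; the proofs are below) =====
def Claim_equal_group_notifications_py : Prop := ∀ (notifications : List (List (String × String))), Dom_group_notifications_py notifications → Pre_group_notifications_py notifications → Spec_group_notifications_py notifications (group_notifications_py notifications)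

-- ===== LEMMAS AND PROOFS =====

-- A's loop body ('insert [] if absent, then append') is the modify-by-key step.
theorem bodyA_eq (d : PySem.Dict String (List (List (String × String)))) (n : List (String × String)) :
    (let groups := if !PySem.Dict.contains d (keyOfB n) then
        PySem.Dict.insert d (keyOfB n) ([] : List (List (String × String)))
      else d
     PySem.Dict.modify groups (keyOfB n) [] (fun l => l ++ [n]))
      = PySem.Dict.modify d (keyOfB n) [] (fun l => l ++ [n]) := by
  by_cases h : PySem.Dict.contains d (keyOfB n)
  · simp [h]
  · simp only [h, Bool.not_false, if_pos]
    show (PySem.Dict.insert d (keyOfB n) []).insert (keyOfB n)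
        (((PySem.Dict.insert d (keyOfB n) []).getD (keyOfB n) []) ++ [n])
      = d.insert (keyOfB n) ((d.getD (keyOfB n) []) ++ [n])
    rw [PySem.Dict.getD_insert_self, PySem.Dict.insert_insert_self,
      PySem.Dict.getD_of_not_contains (h := by simpa using h)]

-- ===== VERDICT (by name: the statement is the Claim_ definition above) =====

theorem group_notifications_py_spec : Claim_equal_group_notifications_py := by
  unfold Claim_equal_group_notifications_py
  intro notifications _ _
  unfold Spec_group_notifications_py group_notifications_py group_notifications_py_alt
  have hbody : (fun (groups : PySem.Dict String (List (List (String × String)))) notification =>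
      let priority := PySem.Dict.getD (PySem.Dict.mk notification) "priority" ""
      let template_type := PySem.Dict.getD (PySem.Dict.mk notification) "template_type" ""
      let group_key := priority ++ "_" ++ template_type
      let groups := if !PySem.Dict.contains groups group_key then
          PySem.Dict.insert groups group_key ([] : List (List (String × String)))
        else groups
      PySem.Dict.modify groups group_key [] (fun l => l ++ [notification]))
      = (fun d p => PySem.Dict.modify d (keyOfB p) [] (fun l => l ++ [p])) := by
    funext d n
    exact bodyA_eq d n
  rw [hbody]
  -- turn the fold over notifications into a fold over (key, notification) pairs
  have hmap : notifications.foldl (fun d p => PySem.Dict.modify d (keyOfB p) [] (fun l => l ++ [p])) PySem.Dict.empty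
      = (notifications.map (fun n => (keyOfB n, n))).foldl
          (fun d p => PySem.Dict.modify d p.1 [] (fun l => l ++ [p.2])) PySem.Dict.empty := by
    rw [List.foldl_map]
  rw [hmap]
  set pairs := notifications.map (fun n => (keyOfB n, n)) with hpairs
  set D := pairs.foldl (fun d p => PySem.Dict.modify d p.1 [] (fun l => l ++ [p.2])) PySem.Dict.empty with hD
  have hnodup : D.keys.Nodup := by
    rw [hD]
    exact PySem.Dict.nodup_keys_foldl_modify_key pairs Prod.fst [] _ _ (by simp)
  have hkeys : D.keys = PySem.Set.ofList (notifications.map keyOfB) := by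
    rw [hD]
    rw [PySem.Dict.keys_foldl_modify_key pairs Prod.fst]
    simp [hpairs, List.map_map, Function.comp_def, PySem.Set.update_eq_append_filter]
  have hgetD : ∀ k, D.getD k [] = notifications.filter (fun n => keyOfB n == k) := by
    intro k
    rw [hD, PySem.Dict.getD_foldl_modify_append]
    simp [hpairs, List.filter_map, List.map_map, Function.comp_def]
  rw [PySem.Dict.items_eq_map_keys D hnodup [], hkeys]
  simp only [PySem.List.dedup_eq_ofList]
  exact List.map_congr_left (fun k _ => by rw [hgetD k])
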